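-- pv_equiv track=rewrite | github.com/joannewolf/code_problems | Google-Kick-Start/2021/Kick_Start_2021-C-4.py | num_to_dict
-- ===== SOURCE A (Python) =====
-- def update_dict(dict: dict, key: str, value: int):
--     if key in dict:
--         dict[key] += value
--     else:
--         dict[key] = value
--
-- def num_to_dict(num: str):
--     result_dict = {}
--     num = num.split('+')
--     for var in num:
--         flag = 0
--         const = True
--         for c in var:
--             if not c.isdigit():
--                 const = False
--                 var_num = int(var[0:flag]) if flag != 0 else 1
--                 var_var = var[flag:]
--                 update_dict(result_dict, var_var, var_num)
--                 break
--             else: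
--                 flag += 1
--         if const:
--             result_dict["const"] = int(var)
--     return result_dict
-- ===== SOURCE B (Python) =====
-- def num_to_dict(num: str):
--     # single left-to-right state machine over the characters; no split, no slicing:
--     # digit chars go into a coefficient buffer until the first symbol char, the rest
--     # into a symbol buffer; '+' (and a sentinel '+' at the end) flushes the term.
--     result = {}
--     digits = []
--     sym = []
--     for c in num + '+':
--         if c == '+':
--             if sym:
--                 key = ''.join(sym)
--                 result[key] = result.get(key, 0) + (int(''.join(digits)) if digits else 1)
--             elif digits:
--                 result['const'] = int(''.join(digits))
--             digits, sym = [], []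
--         elif c.isdigit() and not sym:
--             digits.append(c)
--         else:
--             sym.append(c)
--     return result
-- ===== Notes on version B (the rewrite author's own statement) =====
-- stated objective: alternative
-- what changed: replaces A's split('+') plus per-term indexed scan with flag/const/break and slicing by a single character-level state machine over the whole string that buffers digit and symbol characters and flushes a term at each '+' (and a sentinel '+' at the end)
-- outside the precondition, e.g. on num_to_dict(''): A raises ValueError, B returns {}; on num_to_dict('+'): A raises ValueError, B returns {}; on num_to_dict('1+'): A raises ValueError, B returns {'const': 1}
import Mathlib
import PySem

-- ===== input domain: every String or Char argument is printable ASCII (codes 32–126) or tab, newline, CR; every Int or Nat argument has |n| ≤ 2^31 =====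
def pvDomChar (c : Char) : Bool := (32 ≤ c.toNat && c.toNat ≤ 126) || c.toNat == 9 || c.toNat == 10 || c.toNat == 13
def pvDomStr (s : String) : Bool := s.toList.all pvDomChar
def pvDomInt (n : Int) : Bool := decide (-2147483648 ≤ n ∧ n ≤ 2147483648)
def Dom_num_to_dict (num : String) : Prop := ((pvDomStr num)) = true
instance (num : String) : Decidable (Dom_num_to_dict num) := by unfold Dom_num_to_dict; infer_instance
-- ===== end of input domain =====

-- B replaces A's split('+') + per-term indexed scan (flag/const/break, slicing) by a single
-- character-level state machine over the whole string with digit/symbol buffers flushed at '+'.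

-- ===== PORT A =====
-- int(s) made total; the none case is only reached outside Pre_ (Python raises ValueError there)
def pvInt (cs : List Char) : Int := (PySem.Int.ofChars? cs).getD 0

def pvUpdateDict (d : PySem.Dict String Int) (key : String) (value : Int) : PySem.Dict String Int :=
  if d.contains key then d.modify key 0 (· + value) else d.insert key value

-- the inner 'for c in var' loop of A: walks rest, counting digits in flag; returns (dict, const)
def pvLoopA (d : PySem.Dict String Int) (var rest : List Char) (flag : Nat) :
    PySem.Dict String Int × Bool :=
  match rest with
  | [] => (d, true)
  | c :: cs =>
    if ¬ PySem.Chars.isdigit c then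
      let var_num := if flag ≠ 0 then pvInt (PySem.List.slice var (some 0) (some (flag : Int))) else 1
      let var_var := PySem.List.slice var (some (flag : Int)) none
      (pvUpdateDict d (String.ofList var_var) var_num, false)
    else pvLoopA d var cs (flag + 1)

def num_to_dict (num : String) : List (String × Int) :=
  (((PySem.Str.split? num "+").getD []).foldl (fun d var =>
    let r := pvLoopA d var.toList var.toList 0
    if r.2 then r.1.insert "const" (pvInt var.toList) else r.1) PySem.Dict.empty).items

-- ===== PORT B =====
-- the flush performed at each '+': int(''.join(digits)) is ofChars? of the digit buffer
def pvFlush (d : PySem.Dict String Int) (digits sym : List Char) : PySem.Dict String Int :=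
  if ¬ sym.isEmpty then
    let key := String.ofList sym
    d.insert key (d.getD key 0 + (if ¬ digits.isEmpty then pvInt digits else 1))
  else if ¬ digits.isEmpty then d.insert "const" (pvInt digits)
  else d

-- one step of B's loop body; state = (result, digits, sym)
def pvStepB (st : PySem.Dict String Int × List Char × List Char) (c : Char) :
    PySem.Dict String Int × List Char × List Char :=
  if c = '+' then (pvFlush st.1 st.2.1 st.2.2, [], [])
  else if PySem.Chars.isdigit c ∧ st.2.2.isEmpty then (st.1, st.2.1 ++ [c], st.2.2)
  else (st.1, st.2.1, st.2.2 ++ [c])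

def num_to_dict_alt (num : String) : List (String × Int) :=
  (((num ++ "+").toList).foldl pvStepB (PySem.Dict.empty, [], [])).1.items

-- ===== PRECONDITION & SPEC =====
-- Pre_ excludes exactly the inputs where Python A raises ValueError (int('') on an empty
-- '+'-separated term); B returns a value there (it skips empty terms).
def Pre_num_to_dict (num : String) : Prop :=
  ∀ p ∈ (PySem.Str.split? num "+").getD [], p ≠ ""
instance (num : String) : Decidable (Pre_num_to_dict num) := by unfold Pre_num_to_dict; infer_instance

def pvWitness_num_to_dict : String := "2a+3b+a+7"

def Spec_num_to_dict (num : String) (out : List (String × Int)) : Prop := out = num_to_dict_alt num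
instance (num : String) (out : List (String × Int)) : Decidable (Spec_num_to_dict num out) := by unfold Spec_num_to_dict; infer_instance

-- ===== CLAIM (what is proved, stated in full; the proofs are below) =====
def Claim_equal_num_to_dict : Prop := ∀ (num : String), Dom_num_to_dict num → Pre_num_to_dict num → Spec_num_to_dict num (num_to_dict num)

-- ===== LEMMAS AND PROOFS =====

-- proof-side view of B's two non-'+' branches as a scanner over the (digits, sym) buffers
def pvScanT (st : List Char × List Char) (c : Char) : List Char × List Char :=
  if PySem.Chars.isdigit c ∧ st.2.isEmpty then (st.1 ++ [c], st.2) else (st.1, st.2 ++ [c])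

-- proof-side recursive form of split-on-'+' carrying the pending prefix of the current term
def pvSplit (pre : List Char) : List Char → List (List Char)
  | [] => [pre]
  | c :: r => if c = '+' then pre :: pvSplit [] r else pvSplit (pre ++ [c]) r

theorem go_spec : ∀ (fuel : Nat) (l cur : List Char) (acc : List (List Char)), l.length ≤ fuel →
    PySem.Chars.splitOn.go ['+'] fuel l cur acc = acc.reverse ++ pvSplit cur.reverse l := by
  intro fuel
  induction fuel with
  | zero =>
    intro l cur acc h
    have : l = [] := by cases l <;> simp_all
    subst this
    rw [PySem.Chars.splitOn.go.eq_def]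
    simp [pvSplit]
  | succ n ih =>
    intro l cur acc h
    cases l with
    | nil =>
      rw [PySem.Chars.splitOn.go.eq_def]
      simp [pvSplit]
    | cons c rest =>
      rw [PySem.Chars.splitOn.go.eq_def]
      by_cases hc : c = '+'
      · subst hc
        simp only [List.isPrefixOf, BEq.rfl, Bool.true_and, if_true]
        rw [ih _ _ _ (by simpa using Nat.le_of_succ_le_succ h)]
        simp [pvSplit]
      · have : (List.isPrefixOf ['+'] (c :: rest)) = false := by
          simp [List.isPrefixOf]; exact fun h' => absurd h'.symm hc
        simp only [this, Bool.false_eq_true, if_false]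
        rw [ih _ _ _ (by simpa using Nat.le_of_succ_le_succ h)]
        simp [pvSplit, hc]

theorem splitOn_plus (cs : List Char) : PySem.Chars.splitOn cs ['+'] = pvSplit [] cs := by
  unfold PySem.Chars.splitOn
  rw [go_spec (cs.length + 1) cs [] [] (by omega)]
  simp

theorem scan_sym_nonempty : ∀ (post ds ss : List Char), ss ≠ [] →
    post.foldl pvScanT (ds, ss) = (ds, ss ++ post) := by
  intro post
  induction post with
  | nil => intro ds ss h; simp
  | cons c r ih =>
    intro ds ss h
    have : pvScanT (ds, ss) c = (ds, ss ++ [c]) := by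
      simp [pvScanT, List.isEmpty_iff, h]
    simp only [List.foldl_cons, this]
    rw [ih _ _ (by simp)]
    simp

theorem scan_take_drop : ∀ (post ds : List Char),
    post.foldl pvScanT (ds, []) =
      (ds ++ post.takeWhile PySem.Chars.isdigit, post.dropWhile PySem.Chars.isdigit) := by
  intro post
  induction post with
  | nil => intro ds; simp
  | cons c r ih =>
    intro ds
    by_cases hc : PySem.Chars.isdigit c = true
    · have : pvScanT (ds, []) c = (ds ++ [c], []) := by simp [pvScanT, hc]
      simp only [List.foldl_cons, this, ih]
      simp [hc]
    · have hc' : PySem.Chars.isdigit c = false := by simpa using hc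
      have : pvScanT (ds, []) c = (ds, [c]) := by simp [pvScanT, hc']
      simp only [List.foldl_cons, this]
      rw [scan_sym_nonempty _ _ _ (by simp)]
      simp [hc']

theorem main_scan : ∀ (cs : List Char) (d : PySem.Dict String Int) (pre : List Char),
    ((cs ++ ['+']).foldl pvStepB (d, pre.foldl pvScanT ([], []))).1 =
      (pvSplit pre cs).foldl
        (fun d part => pvFlush d (part.foldl pvScanT ([], [])).1 (part.foldl pvScanT ([], [])).2) d := by
  intro cs
  induction cs with
  | nil =>
    intro d pre
    simp [pvSplit, pvStepB]
  | cons c r ih =>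
    intro d pre
    by_cases hc : c = '+'
    · subst hc
      have h1 : pvStepB (d, pre.foldl pvScanT ([], [])) '+' =
          (pvFlush d (pre.foldl pvScanT ([], [])).1 (pre.foldl pvScanT ([], [])).2, [], []) := by
        simp [pvStepB]
      simp only [List.cons_append, List.foldl_cons, h1]
      have := ih (pvFlush d (pre.foldl pvScanT ([], [])).1 (pre.foldl pvScanT ([], [])).2) []
      simp only [List.foldl_nil] at this
      rw [this]
      simp [pvSplit]
    · have h1 : pvStepB (d, pre.foldl pvScanT ([], [])) c =
          (d, pvScanT (pre.foldl pvScanT ([], [])) c) := by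
        rcases h2 : pre.foldl pvScanT ([], []) with ⟨ds, ss⟩
        simp [pvStepB, pvScanT, hc]
        split_ifs <;> rfl
      simp only [List.cons_append, List.foldl_cons, h1]
      have h3 : pvScanT (pre.foldl pvScanT ([], [])) c = (pre ++ [c]).foldl pvScanT ([], []) := by
        simp
      rw [h3, ih]
      simp [pvSplit, hc]

theorem takeWhile_append_all {α : Type} (p : α → Bool) (pre l : List α)
    (h : ∀ c ∈ pre, p c = true) : (pre ++ l).takeWhile p = pre ++ l.takeWhile p := by
  induction pre with
  | nil => simp
  | cons x xs ih =>
    have hx := h x (by simp)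
    simp [hx, ih (fun c hc => h c (by simp [hc]))]

theorem dropWhile_append_all {α : Type} (p : α → Bool) (pre l : List α)
    (h : ∀ c ∈ pre, p c = true) : (pre ++ l).dropWhile p = l.dropWhile p := by
  induction pre with
  | nil => simp
  | cons x xs ih =>
    have hx := h x (by simp)
    simp [hx, ih (fun c hc => h c (by simp [hc]))]

theorem updateDict_eq (d : PySem.Dict String Int) (k : String) (v : Int) :
    pvUpdateDict d k v = d.insert k (d.getD k 0 + v) := by
  unfold pvUpdateDict
  by_cases h : d.contains k = true
  · simp [h, PySem.Dict.modify]
  · have h' : d.contains k = false := by simpa using h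
    simp [h', PySem.Dict.getD_of_not_contains]

theorem loopA_spec (post : List Char) : ∀ (pre : List Char) (d : PySem.Dict String Int),
    (∀ c ∈ pre, PySem.Chars.isdigit c = true) →
    pvLoopA d (pre ++ post) post pre.length =
      if (post.dropWhile PySem.Chars.isdigit).isEmpty then (d, true)
      else
        let var := pre ++ post
        let tw := var.takeWhile PySem.Chars.isdigit
        (pvUpdateDict d (String.ofList (var.dropWhile PySem.Chars.isdigit))
          (if tw.length ≠ 0 then pvInt tw else 1), false) := by
  induction post with
  | nil => intro pre d h; simp [pvLoopA]
  | cons c cs ih =>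
    intro pre d h
    by_cases hc : PySem.Chars.isdigit c = true
    · have hL : pvLoopA d (pre ++ c :: cs) (c :: cs) pre.length
              = pvLoopA d (pre ++ c :: cs) cs (pre.length + 1) := by
        simp [pvLoopA, hc]
      have e1 : pre ++ c :: cs = (pre ++ [c]) ++ cs := by simp
      have e2 : pre.length + 1 = (pre ++ [c]).length := by simp
      rw [hL, e1, e2, ih (pre ++ [c]) d
        (fun x hx => by rcases List.mem_append.mp hx with h1 | h1
                        · exact h x h1
                        · simp at h1; subst h1; exact hc)]
      simp [List.dropWhile_cons, hc]
    · have hc' : PySem.Chars.isdigit c = false := (by simpa using hc : PySem.Chars.isdigit c = false)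
      have hdw : (pre ++ c :: cs).dropWhile PySem.Chars.isdigit = c :: cs := by
        rw [dropWhile_append_all _ _ _ h]; simp [hc']
      have htw : (pre ++ c :: cs).takeWhile PySem.Chars.isdigit = pre := by
        rw [takeWhile_append_all _ _ _ h]; simp [hc']
      have hsl1 : PySem.List.slice (pre ++ c :: cs) (some 0) (some ((pre.length : Nat) : Int))
          = pre := by
        simp [PySem.List.slice_zero_start, PySem.List.slice_to_natCast]
      have hsl2 : PySem.List.slice (pre ++ c :: cs) (some ((pre.length : Nat) : Int)) none
          = c :: cs := by
        simp [PySem.List.slice_from_natCast]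
      simp only [pvLoopA, hc', hdw, htw, hsl1, hsl2]
      simp
      intro h''
      exact absurd h'' hc

-- A's per-term body equals B's flush of the scanned buffers, for every nonempty term
theorem per_part (d : PySem.Dict String Int) (part : List Char) (hne : part ≠ []) :
    (let r := pvLoopA d (String.ofList part).toList (String.ofList part).toList 0
     if r.2 then r.1.insert "const" (pvInt (String.ofList part).toList) else r.1)
    = pvFlush d (part.foldl pvScanT ([], [])).1 (part.foldl pvScanT ([], [])).2 := by
  have hsc : part.foldl pvScanT ([], []) =
      (part.takeWhile PySem.Chars.isdigit, part.dropWhile PySem.Chars.isdigit) := by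
    rw [scan_take_drop part []]; simp
  have h0 : pvLoopA d (String.ofList part).toList (String.ofList part).toList 0
      = pvLoopA d ([] ++ part) part ([] : List Char).length := by
    simp [String.toList_ofList]
  rw [hsc, h0, loopA_spec part [] d (by simp)]
  simp only [List.nil_append, String.toList_ofList]
  by_cases he : (part.dropWhile PySem.Chars.isdigit).isEmpty
  · have htw : part.takeWhile PySem.Chars.isdigit = part := by
      have := List.takeWhile_append_dropWhile (p := PySem.Chars.isdigit) (l := part)
      rw [List.isEmpty_iff.mp he] at this
      simpa using this
    have hdne : ¬ (part.takeWhile PySem.Chars.isdigit).isEmpty := by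
      rw [htw]; simpa [List.isEmpty_iff] using hne
    simp [he, pvFlush, htw]
    exact fun h => absurd h hne
  · have hlen : ((part.takeWhile PySem.Chars.isdigit).length ≠ 0)
        = ¬ (part.takeWhile PySem.Chars.isdigit).isEmpty := by
      simp [List.isEmpty_iff, List.length_eq_zero_iff]
  -- A took the non-const branch; both sides insert into the symbol key
    rw [if_neg he]
    simp only [Bool.false_eq_true, if_false, updateDict_eq, pvFlush]
    have hse : ¬ (part.dropWhile PySem.Chars.isdigit).isEmpty := he
    simp only [hse, not_false_iff, if_true]
    by_cases hd : (part.takeWhile PySem.Chars.isdigit).isEmpty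
    · have : (part.takeWhile PySem.Chars.isdigit).length = 0 := by
        simpa [List.isEmpty_iff, List.length_eq_zero_iff] using hd
      simp [this, hd]
    · have : (part.takeWhile PySem.Chars.isdigit).length ≠ 0 := by
        simpa [List.isEmpty_iff, List.length_eq_zero_iff] using hd
      simp [this, hd]

theorem split_parts (num : String) :
    (PySem.Str.split? num "+").getD [] = (pvSplit [] num.toList).map String.ofList := by
  have h : ("+" : String).toList = ['+'] := by decide
  simp [PySem.Str.split?, PySem.Chars.split?, h, splitOn_plus]

-- ===== VERDICT (by name: the statement is the Claim_ definition above) =====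
theorem num_to_dict_spec : Claim_equal_num_to_dict := by
  intro num _ hpre
  unfold Spec_num_to_dict num_to_dict num_to_dict_alt
  have htl : (num ++ "+").toList = num.toList ++ ['+'] := by
    simp
  rw [htl]
  have hmain := main_scan num.toList PySem.Dict.empty []
  simp only [List.foldl_nil] at hmain
  rw [hmain, split_parts, List.foldl_map]
  congr 1
  apply PySem.List.foldl_congr_mem
  intro acc part hmem
  have hne : part ≠ [] := by
    intro hempty
    have hp : String.ofList part ∈ (PySem.Str.split? num "+").getD [] := by
      rw [split_parts]; exact List.mem_map_of_mem hmem
    exact hpre _ hp (by rw [hempty])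
  exact per_part acc part hne
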